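-- pv_equiv track=rewrite | github.com/akabiraka/binding_sites | analyzers/residue_agnostic_analysis.py | get_binding_pos_and_regions
-- ===== SOURCE A (Python) =====
-- import math
--
-- def get_binding_pos_and_regions(seq, binding_label, window_size=9):
--     # binding pos will be in the middle in the window
--     seq_len = len(seq)
--     binding_pos_set = set()
--     bindng_region_set = set()
--     for pos, aa in enumerate(binding_label):
--         if aa!=".":
--             binding_pos_set.add(pos)
--             w = math.floor(window_size/2)
--             for reg in range(pos-w, pos+w+1):
--                 if reg>=0 and reg<seq_len: # pos will not be outside of seq-len
--                     bindng_region_set.add(reg)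
--
--     return binding_pos_set, bindng_region_set # unsorted
-- ===== SOURCE B (Python) =====
-- def get_binding_pos_and_regions(seq, binding_label, window_size=9):
--     # sweep over binding positions; regions built as disjoint ascending interval pieces
--     w = window_size // 2
--     positions = [pos for pos, aa in enumerate(binding_label) if aa != "."]
--     n = len(seq)
--     regions = []
--     hi = -1  # highest region index covered so far
--     for p in positions:
--         lo = max(p - w, 0, hi + 1)
--         hi2 = min(p + w, n - 1)
--         regions.extend(range(lo, hi2 + 1))
--         if hi2 > hi:
--             hi = hi2
--     return set(positions), set(regions)
-- ===== Notes on version B (the rewrite author's own statement) =====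
-- stated objective: faster
-- what changed: Replaces the per-binding-position inner window loop with re-adds to a set by a single sweep over the binding positions that appends each window's not-yet-covered interval piece (tracking the highest covered index), so region work is proportional to positions plus output instead of positions times window size.
import Mathlib
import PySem

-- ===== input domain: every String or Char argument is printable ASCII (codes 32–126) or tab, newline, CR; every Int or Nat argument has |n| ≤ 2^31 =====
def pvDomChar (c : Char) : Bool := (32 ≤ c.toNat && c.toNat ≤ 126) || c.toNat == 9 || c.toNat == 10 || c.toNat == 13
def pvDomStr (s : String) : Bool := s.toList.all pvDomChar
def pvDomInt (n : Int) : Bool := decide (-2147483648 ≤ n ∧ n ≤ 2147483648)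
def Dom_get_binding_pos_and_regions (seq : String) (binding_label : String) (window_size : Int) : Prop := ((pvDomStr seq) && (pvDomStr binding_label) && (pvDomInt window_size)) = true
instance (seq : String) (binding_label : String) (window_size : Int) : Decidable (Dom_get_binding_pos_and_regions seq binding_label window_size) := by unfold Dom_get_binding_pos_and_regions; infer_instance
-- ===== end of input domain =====

-- B replaces A's per-position window loop (which re-adds already-covered cells to the set)
-- by one sweep over the binding positions appending each window's uncovered interval piece; faster when windows overlap.
-- math.floor(window_size/2) is ported as PySem.Int.floordiv window_size 2: exact, since for |window_size| ≤ 2^31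
-- the float division by 2 is exact and its floor equals Python's floor division.

-- ===== PORT A =====
-- the body of A's inner `for reg in range(...)` loop
def pvAInner (seq_len : Int) (s : PySem.Set Int) (reg : Int) : PySem.Set Int :=
  if 0 ≤ reg ∧ reg < seq_len then PySem.Set.add s reg else s

-- the body of A's outer `for pos, aa in enumerate(binding_label)` loop
def pvAStep (seq_len window_size : Int) (st : PySem.Set Int × PySem.Set Int) (pa : Int × Char) : PySem.Set Int × PySem.Set Int :=
  if pa.2 != '.' then
    let w := PySem.Int.floordiv window_size 2
    (PySem.Set.add st.1 pa.1,
     (PySem.List.pyRange (pa.1 - w) (pa.1 + w + 1) 1).foldl (pvAInner seq_len) st.2)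
  else st

def get_binding_pos_and_regions (seq : String) (binding_label : String) (window_size : Int) : List Int × List Int :=
  let seq_len := PySem.Str.len seq
  (PySem.List.enumerate binding_label.toList 0).foldl (pvAStep seq_len window_size) ([], [])

-- ===== PORT B =====
-- the body of B's `for p in positions` sweep: append the uncovered piece of the window, bump the cover mark
def pvBStep (n w : Int) (st : List Int × Int) (p : Int) : List Int × Int :=
  let lo := max (max (p - w) 0) (st.2 + 1)
  let hi2 := min (p + w) (n - 1)
  (st.1 ++ PySem.List.pyRange lo (hi2 + 1) 1, if hi2 > st.2 then hi2 else st.2)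

def get_binding_pos_and_regions_alt (seq : String) (binding_label : String) (window_size : Int) : List Int × List Int :=
  let w := PySem.Int.floordiv window_size 2
  let positions := ((PySem.List.enumerate binding_label.toList 0).filter (fun pa => pa.2 != '.')).map (fun pa => pa.1)
  let n := PySem.Str.len seq
  let res := positions.foldl (pvBStep n w) ([], -1)
  (PySem.Set.ofList positions, PySem.Set.ofList res.1)

-- ===== PRECONDITION & SPEC =====
def Spec_get_binding_pos_and_regions (seq : String) (binding_label : String) (window_size : Int) (out : List Int × List Int) : Prop := out = get_binding_pos_and_regions_alt seq binding_label window_size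
instance (seq : String) (binding_label : String) (window_size : Int) (out : List Int × List Int) : Decidable (Spec_get_binding_pos_and_regions seq binding_label window_size out) := by unfold Spec_get_binding_pos_and_regions; infer_instance

-- ===== CLAIM (what is proved, stated in full; the proofs are below) =====
def Claim_equal_get_binding_pos_and_regions : Prop := ∀ (seq : String) (binding_label : String) (window_size : Int), Dom_get_binding_pos_and_regions seq binding_label window_size → Spec_get_binding_pos_and_regions seq binding_label window_size (get_binding_pos_and_regions seq binding_label window_size)

-- ===== LEMMAS AND PROOFS =====

-- A's inner window loop, started from a region set whose elements are ≤ hi and which contains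
-- every cell of [a, hi] ∩ [0, ∞), appends exactly the not-yet-covered clipped interval piece.
lemma pvInner_eq (n : Int) : ∀ (k : Nat) (a b : Int), b - a ≤ k →
    ∀ (s : List Int) (hi : Int),
      (∀ x ∈ s, x ≤ hi) →
      (∀ x, a ≤ x → 0 ≤ x → x ≤ hi → x ∈ s) →
      (PySem.List.pyRange a b 1).foldl (pvAInner n) s
        = s ++ PySem.List.pyRange (max (max a 0) (hi + 1)) (min (b - 1) (n - 1) + 1) 1 := by
  intro k
  induction k with
  | zero =>
    intro a b hab s hi _ _
    rw [PySem.List.pyRange_one_eq_nil (by omega),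
        PySem.List.pyRange_one_eq_nil (by omega), List.append_nil]
    rfl
  | succ k ih =>
    intro a b hab s hi hle hcov
    by_cases hba : b ≤ a
    · rw [PySem.List.pyRange_one_eq_nil hba,
          PySem.List.pyRange_one_eq_nil (by omega), List.append_nil]
      rfl
    · push Not at hba
      rw [PySem.List.pyRange_one_cons hba, List.foldl_cons]
      by_cases hin : 0 ≤ a ∧ a < n
      · by_cases hahi : a ≤ hi
        · -- already covered: add is a no-op
          have hmem : a ∈ s := hcov a le_rfl hin.1 hahi
          have hstep : pvAInner n s a = s := by
            simp [pvAInner, hin, PySem.Set.add, PySem.Set.contains, hmem]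
          rw [hstep, ih (a + 1) b (by omega) s hi hle (fun x hx => hcov x (by omega)),
              show max (max (a+1) 0) (hi+1) = max (max a 0) (hi+1) by omega]
        · -- new cell: appended at the end, cover mark moves to a
          push Not at hahi
          have hnmem : a ∉ s := fun h => absurd (hle a h) (by omega)
          have hstep : pvAInner n s a = s ++ [a] := by
            simp [pvAInner, hin, PySem.Set.add, PySem.Set.contains, hnmem]
          rw [hstep, ih (a + 1) b (by omega) (s ++ [a]) a
              (by intro x hx; rcases List.mem_append.1 hx with h | h
                  · exact le_of_lt (lt_of_le_of_lt (hle x h) hahi)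
                  · simp at h; omega)
              (by intro x h1 _ h3; omega),
              show max (max (a+1) 0) (a+1) = a + 1 by omega,
              show max (max a 0) (hi+1) = a by omega,
              PySem.List.pyRange_one_cons (show a < min (b-1) (n-1) + 1 by omega)]
          simp
      · -- out of [0, n): skipped
        have hstep : pvAInner n s a = s := by simp [pvAInner, hin]
        rw [hstep, ih (a + 1) b (by omega) s hi hle (fun x hx => hcov x (by omega))]
        by_cases ha0 : a < 0
        · rw [show max (max (a+1) 0) (hi+1) = max (max a 0) (hi+1) by omega]
        · -- a ≥ n: both remaining ranges are empty
          rw [PySem.List.pyRange_one_eq_nil (by omega),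
              PySem.List.pyRange_one_eq_nil (by omega)]

-- the sweep invariant: A's region fold over the (strictly increasing) binding positions
-- equals the list part of B's sweep fold, and that list is strictly increasing.
lemma pvOuter_eq (n w : Int) : ∀ (P : List Int) (s : List Int) (hi lb : Int),
    P.Pairwise (· < ·) →
    (∀ p ∈ P, lb ≤ max (p - w) 0) →
    s.Pairwise (· < ·) →
    (∀ x ∈ s, x ≤ hi) →
    (∀ x, lb ≤ x → 0 ≤ x → x ≤ hi → x ∈ s) →
    P.foldl (fun s p => (PySem.List.pyRange (p - w) (p + w + 1) 1).foldl (pvAInner n) s) s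
      = (P.foldl (pvBStep n w) (s, hi)).1
    ∧ (P.foldl (pvBStep n w) (s, hi)).1.Pairwise (· < ·) := by
  intro P
  induction P with
  | nil => intro s hi lb _ _ hsort _ _; exact ⟨rfl, hsort⟩
  | cons p rest ih =>
    intro s hi lb hP hlb hsort hle hcov
    have hplb : lb ≤ max (p - w) 0 := hlb p List.mem_cons_self
    have hrest : ∀ q ∈ rest, p < q := fun q hq => (List.pairwise_cons.1 hP).1 q hq
    rw [List.foldl_cons, List.foldl_cons]
    have hinner := pvInner_eq n (p + w + 1 - (p - w)).toNat (p - w) (p + w + 1) (by omega) s hi hle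
      (fun x hx h0 h1 => hcov x (by omega) h0 h1)
    have hB : pvBStep n w (s, hi) p
        = (s ++ PySem.List.pyRange (max (max (p - w) 0) (hi + 1)) (min (p + w) (n - 1) + 1) 1,
           if min (p + w) (n - 1) > hi then min (p + w) (n - 1) else hi) := rfl
    have hEnd : p + w + 1 - 1 = p + w := by omega
    rw [hinner, hEnd] at *
    rw [hB]
    set hi2 := min (p + w) (n - 1) with hhi2
    set lo := max (max (p - w) 0) (hi + 1) with hlo
    have hif : (if hi2 > hi then hi2 else hi) = max hi hi2 := by
      by_cases h : hi2 > hi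
      · rw [if_pos h]; omega
      · rw [if_neg h]; omega
    rw [hif]
    apply ih (s ++ PySem.List.pyRange lo (hi2 + 1) 1) (max hi hi2) (max (p - w) 0)
      ((List.pairwise_cons.1 hP).2)
      (fun q hq => by have := hrest q hq; omega)
    · -- sortedness of the new accumulator
      rw [List.pairwise_append]
      refine ⟨hsort, PySem.List.pairwise_lt_pyRange_one _ _, ?_⟩
      intro x hx y hy
      have hy' := PySem.List.mem_pyRange_one.1 hy
      have := hle x hx
      omega
    · -- all elements ≤ new cover mark
      intro x hx
      rcases List.mem_append.1 hx with h | h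
      · have := hle x h; omega
      · have := PySem.List.mem_pyRange_one.1 h; omega
    · -- coverage from the new window's left edge
      intro x h1 h2 h3
      by_cases hxhi : x ≤ hi
      · exact List.mem_append.2 (Or.inl (hcov x (by omega) h2 hxhi))
      · refine List.mem_append.2 (Or.inr (PySem.List.mem_pyRange_one.2 ⟨by omega, by omega⟩))

-- A's combined fold over enumerate splits into the two independent folds over the filtered positions
lemma pvSplit (n ws : Int) : ∀ (l : List (Int × Char)) (s1 s2 : PySem.Set Int),
    l.foldl (pvAStep n ws) (s1, s2)
      = (((l.filter (fun pa => pa.2 != '.')).map (fun pa => pa.1)).foldl PySem.Set.add s1,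
         ((l.filter (fun pa => pa.2 != '.')).map (fun pa => pa.1)).foldl
           (fun s p => (PySem.List.pyRange (p - PySem.Int.floordiv ws 2)
               (p + PySem.Int.floordiv ws 2 + 1) 1).foldl (pvAInner n) s) s2) := by
  intro l
  induction l with
  | nil => intro s1 s2; rfl
  | cons pa rest ih =>
    intro s1 s2
    by_cases h : pa.2 != '.'
    · rw [List.foldl_cons, show pvAStep n ws (s1, s2) pa
          = (PySem.Set.add s1 pa.1,
             (PySem.List.pyRange (pa.1 - PySem.Int.floordiv ws 2)
               (pa.1 + PySem.Int.floordiv ws 2 + 1) 1).foldl (pvAInner n) s2) by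
            simp [pvAStep, h]]
      rw [ih]
      simp [h]
    · rw [List.foldl_cons, show pvAStep n ws (s1, s2) pa = (s1, s2) by simp [pvAStep, h]]
      rw [ih]
      simp [h]

-- ===== VERDICT (by name: the statement is the Claim_ definition above) =====
theorem get_binding_pos_and_regions_spec : Claim_equal_get_binding_pos_and_regions := by
  intro seq binding_label window_size _
  unfold Spec_get_binding_pos_and_regions
  unfold get_binding_pos_and_regions get_binding_pos_and_regions_alt
  set n := PySem.Str.len seq
  set w := PySem.Int.floordiv window_size 2 with hw
  set P := ((PySem.List.enumerate binding_label.toList 0).filter (fun pa => pa.2 != '.')).map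
      (fun pa => pa.1) with hP
  have hPsort : P.Pairwise (· < ·) := by
    rw [hP, List.pairwise_map]
    exact ((PySem.List.pairwise_lt_enumerate binding_label.toList 0).filter _)
  rw [pvSplit]
  have houter := pvOuter_eq n w P [] (-1) 0 hPsort
    (fun p _ => by omega) (List.Pairwise.nil) (by simp) (by intro x h1 h2 h3; omega)
  have hnodupB : (P.foldl (pvBStep n w) ([], -1)).1.Nodup :=
    houter.2.imp (fun h => ne_of_lt h)
  refine Prod.ext ?_ ?_
  · show P.foldl PySem.Set.add [] = PySem.Set.ofList P
    exact (PySem.Set.ofList_eq_foldl P).symm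
  · show P.foldl _ [] = PySem.Set.ofList (P.foldl (pvBStep n w) ([], -1)).1
    rw [PySem.Set.ofList_eq_self_of_nodup _ hnodupB]
    exact houter.1
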